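-- pv_equiv track=rewrite | github.com/chessset5/validcloudfilename | filename.py | removeDiplicateSpaces
-- ===== SOURCE A (Python) =====
-- def removeDiplicateSpaces(input: str) -> str:
--     # eg "a    a" -> "a a", "a   a  b" -> "a a b"
--     ret = str()
--     for c in input:
--         ret += c
--         if ret.__len__() > 1:
--             if (c == ' ') and (ret[-2] == c):
--                 ret = ret[:-1]
--     return ret
-- ===== SOURCE B (Python) =====
-- def removeDiplicateSpaces(input: str) -> str:
--     # run-length grouping: scan maximal runs of equal chars; a run of spaces becomes one space
--     out = []
--     i = 0
--     n = len(input)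
--     while i < n:
--         c = input[i]
--         j = i
--         while j < n and input[j] == c:
--             j += 1
--         out.append(' ' if c == ' ' else input[i:j])
--         i = j
--     return ''.join(out)
-- ===== Notes on version B (the rewrite author's own statement) =====
-- stated objective: alternative
-- what changed: Replaces the grow-append-then-inspect-last-two-characters output buffer (undoing appends by slicing off the last char) with a run-length scan over maximal runs of equal characters, emitting one space per space-run and whole runs otherwise, joined once at the end.
import Mathlib
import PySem

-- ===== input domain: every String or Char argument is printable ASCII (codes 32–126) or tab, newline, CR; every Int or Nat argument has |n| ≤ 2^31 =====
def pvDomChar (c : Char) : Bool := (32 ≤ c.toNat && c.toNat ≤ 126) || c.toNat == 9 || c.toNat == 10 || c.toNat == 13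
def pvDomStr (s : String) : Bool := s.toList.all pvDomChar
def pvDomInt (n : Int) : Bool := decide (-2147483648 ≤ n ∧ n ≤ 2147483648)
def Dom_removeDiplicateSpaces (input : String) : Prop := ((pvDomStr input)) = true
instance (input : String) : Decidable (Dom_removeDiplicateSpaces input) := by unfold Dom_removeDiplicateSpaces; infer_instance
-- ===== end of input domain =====

-- B replaces A's grow-and-inspect output buffer with a run-length scan over maximal runs of equal characters (objective: alternative).

-- ===== PORT A =====
-- literal transliteration of A's loop: append c, then if len>1 and c==' ' and ret[-2]==c, drop the last char
def goA (ret : List Char) : List Char → List Char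
  | [] => ret
  | c :: rest =>
    let r := ret ++ [c]
    let r2 := if r.length > 1 then
        (if c == ' ' && (PySem.List.pyGet? r (-2) == some c) then PySem.List.slice r none (some (-1)) else r)
      else r
    goA r2 rest

def removeDiplicateSpaces (input : String) : String := String.ofList (goA [] input.toList)

-- ===== PORT B =====
-- B scans maximal runs of equal characters; a run of spaces emits one space, any other run is kept whole
def goB : List Char → List Char
  | [] => []
  | c :: rest =>
    (if c = ' ' then [' '] else c :: rest.takeWhile (· == c)) ++ goB (rest.dropWhile (· == c))
termination_by l => l.length
decreasing_by
  simp only [List.length_cons]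
  exact Nat.lt_succ_of_le (List.length_dropWhile_le _ _)

def removeDiplicateSpaces_alt (input : String) : String := String.ofList (goB input.toList)

-- ===== PRECONDITION & SPEC =====
def Spec_removeDiplicateSpaces (input : String) (out : String) : Prop := out = removeDiplicateSpaces_alt input
instance (input : String) (out : String) : Decidable (Spec_removeDiplicateSpaces input out) := by unfold Spec_removeDiplicateSpaces; infer_instance

-- ===== CLAIM (what is proved, stated in full; the proofs are below) =====
def Claim_equal_removeDiplicateSpaces : Prop := ∀ (input : String), Dom_removeDiplicateSpaces input → Spec_removeDiplicateSpaces input (removeDiplicateSpaces input)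

-- ===== LEMMAS AND PROOFS =====


-- A's indexed look-back ret[-2] is the last char of the buffer before the append
lemma pyGet2 (ret : List Char) (c : Char) (h : ret ≠ []) :
    PySem.List.pyGet? (ret ++ [c]) (-2) = ret.getLast? := by
  have h1 : 1 ≤ ret.length := List.length_pos_iff.mpr h
  simp [PySem.List.pyGet?, PySem.List.pyIdx?, h1, List.getLast?_eq_getElem?]
  rw [List.getElem_append_left (by omega), List.getElem?_eq_getElem (by omega)]

-- A's loop body, simplified: the appended char is dropped again iff it is a space following a space
lemma stepA (ret : List Char) (c : Char) :
    (if (ret ++ [c]).length > 1 then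
        (if c == ' ' && (PySem.List.pyGet? (ret ++ [c]) (-2) == some c)
         then PySem.List.slice (ret ++ [c]) none (some (-1)) else ret ++ [c])
      else ret ++ [c])
    = if ret.getLast? = some ' ' ∧ c = ' ' then ret else ret ++ [c] := by
  by_cases hret : ret = []
  · subst hret; simp
  · have hl : (ret ++ [c]).length > 1 := by
      have := List.length_pos_iff.mpr hret; simp; omega
    rw [if_pos hl, pyGet2 ret c hret, PySem.List.slice_to_neg_one]
    by_cases hc : c = ' '
    · subst hc
      by_cases hg : ret.getLast? = some ' '
      · simp [hg]
      · simp [hg]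
    · simp [hc]

-- a non-space head char passes through goB one char at a time
lemma goB_cons_ne (c : Char) (hc : c ≠ ' ') (cs : List Char) :
    goB (c :: cs) = c :: goB cs := by
  cases cs with
  | nil => simp [goB, hc]
  | cons d cs2 =>
    by_cases hd : d = c
    · subst hd
      rw [goB, goB]
      simp [hc]
    · rw [goB]
      have h1 : (d == c) = false := by simp [hd]
      simp [hc, h1]

lemma goB_cons_space (cs : List Char) :
    goB (' ' :: cs) = ' ' :: goB (cs.dropWhile (· == ' ')) := by
  rw [goB]; simp

-- loop invariant: A's buffer loop equals B's run scan, with pending-space state read off the buffer's last char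
lemma goA_eq_goB : ∀ n (cs ret : List Char), cs.length ≤ n →
    goA ret cs = ret ++ (if ret.getLast? = some ' ' then goB (cs.dropWhile (· == ' ')) else goB cs) := by
  intro n
  induction n with
  | zero =>
    intro cs ret h
    have : cs = [] := List.length_eq_zero_iff.mp (Nat.le_zero.mp h)
    subst this
    simp [goA, goB]
  | succ n ih =>
    intro cs ret h
    cases cs with
    | nil => simp [goA, goB]
    | cons c rest =>
      simp only [goA]
      rw [stepA]
      have hr : rest.length ≤ n := by simpa using Nat.lt_succ_iff.mp (by simpa using h)
      by_cases hg : ret.getLast? = some ' ' <;> by_cases hc : c = ' '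
      · rw [if_pos ⟨hg, hc⟩, ih rest ret hr, if_pos hg, if_pos hg]
        subst hc; simp
      · rw [if_neg (by tauto), ih rest (ret ++ [c]) hr, if_pos hg]
        rw [List.getLast?_concat]
        rw [if_neg (by simpa using hc)]
        have : (c :: rest).dropWhile (· == ' ') = c :: rest := by
          rw [List.dropWhile_cons_of_neg (by simpa using hc)]
        rw [this, goB_cons_ne c hc rest]
        simp
      · rw [if_neg (by tauto), ih rest (ret ++ [c]) hr, if_neg hg]
        rw [List.getLast?_concat]
        subst hc
        rw [if_pos rfl, goB_cons_space]
        simp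
      · rw [if_neg (by tauto), ih rest (ret ++ [c]) hr, if_neg hg]
        rw [List.getLast?_concat]
        rw [if_neg (by simpa using hc)]
        rw [goB_cons_ne c hc rest]
        simp

-- ===== VERDICT (by name: the statement is the Claim_ definition above) =====
theorem removeDiplicateSpaces_spec : Claim_equal_removeDiplicateSpaces := by
  intro input _
  unfold Spec_removeDiplicateSpaces removeDiplicateSpaces removeDiplicateSpaces_alt
  have := goA_eq_goB input.toList.length input.toList [] le_rfl
  simp at this
  rw [this]
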